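-- pv_equiv track=rewrite | github.com/NobuyukiInoue/LeetCode | Problems/1300_1399/1306_Jump_Game_III/Project_Python3/Jump_Game_III.py | canReach3
-- ===== SOURCE A (Python) =====
-- from typing import List, Dict, Tuple
--
-- def canReach3(arr: List[int], start: int) -> bool:
--     # 253ms - 274ms
--     visited = [0]*len(arr)
--     pos = [start]
--     while pos:
--         nextPos = []
--         while pos:
--             x = pos.pop()
--             if arr[x] == 0:
--                 return True
--             visited[x] = 1
--             for y in (x - arr[x], x + arr[x]):
--                 if 0 <= y < len(arr) and not visited[y]:
--                     nextPos.append(y)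
--         pos = nextPos
--     return False
-- ===== SOURCE B (Python) =====
-- def canReach3(arr, start):
--     # Backward fixed-point iteration: start from the zero positions and
--     # repeatedly sweep the whole array (alternating direction), marking an
--     # index good when one of its two jump targets is already good, until a
--     # sweep changes nothing.  No frontier, no visited set: the answer is
--     # whether `start` ends up in the least fixed point.
--     n = len(arr)
--     good = [x == 0 for x in arr]
--     forward = True
--     changed = True
--     while changed:
--         changed = False
--         order = range(n) if forward else range(n - 1, -1, -1)
--         for i in order:
--             if not good[i]:
--                 for j in (i - arr[i], i + arr[i]):
--                     if 0 <= j < n and good[j]: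
--                         good[i] = True
--                         changed = True
--                         break
--         forward = not forward
--     return good[start]
-- ===== Notes on version B (the rewrite author's own statement) =====
-- stated objective: alternative
-- what changed: Replaced A's forward frontier search from `start` (visited list + BFS levels) by a backward least-fixed-point computation: seed the zero positions, then repeatedly sweep the whole array in alternating directions marking any index whose jump target is already marked, until a sweep is stable; answer is the mark at `start` — no frontier and no visited set at all.
-- outside the precondition, e.g. on canReach3([0, 5, 1], -1): A returns True, B returns False
import Mathlib
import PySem

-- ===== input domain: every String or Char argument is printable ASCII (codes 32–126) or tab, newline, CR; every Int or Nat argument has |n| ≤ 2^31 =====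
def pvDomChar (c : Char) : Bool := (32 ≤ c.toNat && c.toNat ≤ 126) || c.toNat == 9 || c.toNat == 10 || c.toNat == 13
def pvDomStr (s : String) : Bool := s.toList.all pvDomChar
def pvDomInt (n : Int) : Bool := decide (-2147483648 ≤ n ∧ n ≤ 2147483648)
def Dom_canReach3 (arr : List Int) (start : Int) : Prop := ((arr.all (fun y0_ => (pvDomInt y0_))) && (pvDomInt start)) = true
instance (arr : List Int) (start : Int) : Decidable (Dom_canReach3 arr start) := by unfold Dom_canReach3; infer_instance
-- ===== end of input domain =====

-- B replaces A's forward frontier search from `start` (visited list + BFS levels) by a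
-- backward least-fixed-point computation: seed the zero positions, sweep the whole array
-- in alternating directions marking indices whose jump target is marked, until stable,
-- then read off the mark at `start` (objective: alternative).

-- ===== PORT A =====

-- result of A's inner `while pos` loop: found = `return True` fired,
-- err = a Python IndexError (outside Pre_), cont = fell through with new state
inductive InnerRes where
  | found : InnerRes
  | err : InnerRes
  | cont : List Int → List Int → InnerRes

lemma pop?_rest_length {α : Type} {xs rest : List α} {x : α}
    (h : PySem.List.pop? xs = some (x, rest)) : rest.length < xs.length := by
  have := PySem.List.length_of_pop?_eq_some xs h
  simp at this; omega

-- inner `while pos: x = pos.pop(); ...` of A, transliterated step for step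
def innerA (arr : List Int) (visited pos nextPos : List Int) : InnerRes :=
  match h : PySem.List.pop? pos with
  | none => .cont visited nextPos
  | some (x, rest) =>
    match PySem.List.pyGet? arr x with       -- arr[x] (IndexError → err)
    | none => .err
    | some a =>
      if a = 0 then .found                   -- if arr[x] == 0: return True
      else
        match PySem.List.pySet? visited x 1 with  -- visited[x] = 1 (IndexError → err)
        | none => .err
        | some v2 =>
          -- for y in (x - arr[x], x + arr[x]): bounds and `not visited[y]` filter
          let np1 := if 0 ≤ x - a ∧ x - a < (arr.length : Int) ∧ PySem.List.pyGetD v2 (x - a) 0 = 0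
                     then nextPos ++ [x - a] else nextPos
          let np2 := if 0 ≤ x + a ∧ x + a < (arr.length : Int) ∧ PySem.List.pyGetD v2 (x + a) 0 = 0
                     then np1 ++ [x + a] else np1
          innerA arr v2 rest np2
termination_by pos.length
decreasing_by
  exact pop?_rest_length h

-- outer `while pos` loop of A; `fuel` is a pure totality device: each round
-- either visits a new index or turns a fully-visited frontier into a fresh one,
-- so 2*len(arr)+1 rounds always suffice (proved below in outerA_iff)
def outerA (arr visited pos : List Int) (fuel : Nat) : Bool :=
  match fuel with
  | 0 => false
  | fuel + 1 =>
    if pos.isEmpty then false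
    else
      match innerA arr visited pos [] with
      | .found => true
      | .err => false          -- Python raised (outside Pre_)
      | .cont v' np' => outerA arr v' np' fuel

-- A: visited = [0]*len(arr); pos = [start]; two nested while loops
def canReach3 (arr : List Int) (start : Int) : Bool :=
  outerA arr (List.replicate arr.length 0) [start] (2 * arr.length + 1)

-- ===== PORT B =====

-- one body of B's inner `for j in (i - arr[i], i + arr[i]) … break` at index i:
-- returns the updated good list and the `changed`-contribution of this i
def stepIdx (arr : List Int) (good : List Bool) (i : Nat) : List Bool × Bool :=
  -- a = arr[i] (i ∈ range(n): in range) is written out as arr.getD i 0 below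
  if good.getD i false then (good, false)          -- if not good[i]:
  else if 0 ≤ (i : Int) - arr.getD i 0 ∧ (i : Int) - arr.getD i 0 < (arr.length : Int) ∧ good.getD ((i : Int) - arr.getD i 0).toNat false
  then (good.set i true, true)
  else if 0 ≤ (i : Int) + arr.getD i 0 ∧ (i : Int) + arr.getD i 0 < (arr.length : Int) ∧ good.getD ((i : Int) + arr.getD i 0).toNat false
  then (good.set i true, true)
  else (good, false)

-- B's `for i in order:` loop, threading (good, changed)
def passB (arr : List Int) (idxs : List Nat) (good : List Bool) (ch : Bool) : List Bool × Bool :=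
  match idxs with
  | [] => (good, ch)
  | i :: t =>
    let r := stepIdx arr good i
    passB arr t r.1 (ch || r.2)

-- helpers for loopFixB's termination (cited by name below)
def countFalse (g : List Bool) : Nat := g.countP (fun b => !b)

-- B's `while changed:` loop, alternating sweep direction; `fuel` is a pure
-- totality device: every continuing round strictly shrinks countFalse, so with
-- fuel = countFalse good + 1 the 0-branch is never reached (proved below)
def loopFixB (arr : List Int) (good : List Bool) (forward : Bool) (fuel : Nat) : List Bool :=
  match fuel with
  | 0 => good
  | fuel + 1 =>
    let idxs := if forward then List.range arr.length else (List.range arr.length).reverse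
    let r := passB arr idxs good false
    if r.2 then loopFixB arr r.1 (!forward) fuel
    else r.1

-- B: good = [x == 0 for x in arr]; alternating sweeps to a fixed point; return good[start]
def canReach3_alt (arr : List Int) (start : Int) : Bool :=
  PySem.List.pyGetD
    (loopFixB arr (arr.map (fun a => a == 0)) true (countFalse (arr.map (fun a => a == 0)) + 1))
    start false

-- ===== PRECONDITION & SPEC =====
-- Pre_ restricts to the problem's natural domain 0 ≤ start < len(arr) (LeetCode 1306
-- guarantees it): outside it A either raises IndexError (start not in [-len, len)),
-- or, for -len ≤ start < 0, returns a value produced by Python's negative-index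
-- wraparound (which also aliases visited[start] with visited[start+len]); B reads the
-- wrapped cell of its fixed-point table, which need not coincide.
def Pre_canReach3 (arr : List Int) (start : Int) : Prop :=
  0 ≤ start ∧ start < (arr.length : Int)
instance (arr : List Int) (start : Int) : Decidable (Pre_canReach3 arr start) := by
  unfold Pre_canReach3; infer_instance

def pvWitness_canReach3 : List Int × Int := ([2, 1, 0], 0)

def Spec_canReach3 (arr : List Int) (start : Int) (out : Bool) : Prop :=
  out = canReach3_alt arr start
instance (arr : List Int) (start : Int) (out : Bool) : Decidable (Spec_canReach3 arr start out) := by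
  unfold Spec_canReach3; infer_instance

-- ===== CLAIM (what is proved, stated in full; the proofs are below) =====
def Claim_equal_canReach3 : Prop := ∀ (arr : List Int) (start : Int), Dom_canReach3 arr start → Pre_canReach3 arr start → Spec_canReach3 arr start (canReach3 arr start)

-- ===== LEMMAS AND PROOFS =====

-- helpers used by outerA's termination argument (cited by name in decreasing_by)
def unvisA (v : List Int) : Nat := v.countP (fun a => a == 0)

-- flag = 1 when the frontier is non-empty yet every element is already marked:
-- such a level leaves unvisA unchanged but produces a frontier of unmarked nodes.
def flagA (v pos : List Int) : Nat :=
  if pos ≠ [] ∧ pos.all (fun x => !(PySem.List.pyGetD v x 0 == 0)) then 1 else 0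

lemma pop?_none_eq {α : Type} (xs : List α) (h : PySem.List.pop? xs = none) : xs = [] := by
  cases xs using List.reverseRecOn with
  | nil => rfl
  | append_singleton ys y => rw [PySem.List.pop?_last] at h; cases h

lemma pop?_concat {α : Type} {xs rest : List α} {x : α}
    (h : PySem.List.pop? xs = some (x, rest)) : xs = rest ++ [x] := by
  cases xs using List.reverseRecOn with
  | nil => cases h
  | append_singleton ys y =>
      rw [PySem.List.pop?_last] at h
      cases h; rfl

lemma pyIdx?_some_lt {n : Nat} {i : Int} {k : Nat}
    (h : PySem.List.pyIdx? n i = some k) : k < n := by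
  unfold PySem.List.pyIdx? at h
  split_ifs at h <;> injection h with h <;> omega

-- countP (· == 0) facts about List.set
lemma unvisA_set_le (v : List Int) (m : Nat) : unvisA (v.set m 1) ≤ unvisA v := by
  induction v generalizing m with
  | nil => simp [unvisA]
  | cons a t ih =>
      cases m with
      | zero =>
          simp only [List.set_cons_zero, unvisA, List.countP_cons]
          split_ifs <;> simp_all
      | succ m =>
          simp only [unvisA, List.set_cons_succ, List.countP_cons]
          have := ih m
          simp only [unvisA] at this; omega

lemma unvisA_set_lt (v : List Int) (m : Nat) (hm : m < v.length) (h0 : v[m] = 0) :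
    unvisA (v.set m 1) < unvisA v := by
  induction v generalizing m with
  | nil => simp at hm
  | cons a t ih =>
      cases m with
      | zero =>
          simp only [List.getElem_cons_zero] at h0
          subst h0
          simp only [List.set_cons_zero, unvisA, List.countP_cons]
          norm_num
      | succ m =>
          simp only [List.length_cons, Nat.succ_lt_succ_iff] at hm
          simp only [List.getElem_cons_succ] at h0
          simp only [unvisA, List.set_cons_succ, List.countP_cons]
          have := ih m hm h0
          simp only [unvisA] at this; omega

lemma unvisA_set_eq (v : List Int) (m : Nat) (hm : m < v.length) (h0 : v[m] ≠ 0) :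
    unvisA (v.set m 1) = unvisA v := by
  induction v generalizing m with
  | nil => simp at hm
  | cons a t ih =>
      cases m with
      | zero =>
          simp only [List.getElem_cons_zero] at h0
          simp only [List.set_cons_zero, unvisA, List.countP_cons]
          simp [h0]
      | succ m =>
          simp only [List.length_cons, Nat.succ_lt_succ_iff] at hm
          simp only [List.getElem_cons_succ] at h0
          simp only [unvisA, List.set_cons_succ, List.countP_cons]
          have := ih m hm h0
          simp only [unvisA] at this; omega

-- resolving a successful visited[z] = 1
lemma pySet?_resolve {v v2 : List Int} {z : Int}
    (h : PySem.List.pySet? v z 1 = some v2) :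
    ∃ (m : Nat) (hm : m < v.length),
      v2 = v.set m 1 ∧ PySem.List.pyGetD v z 0 = v[m] := by
  unfold PySem.List.pySet? at h
  cases hk : PySem.List.pyIdx? v.length z with
  | none => rw [hk] at h; cases h
  | some k =>
      rw [hk] at h
      have hlt := pyIdx?_some_lt hk
      refine ⟨k, hlt, ?_, ?_⟩
      · simpa using h.symm
      · simp [PySem.List.pyGetD, PySem.List.pyGet?, hk, List.getElem?_eq_getElem hlt]

lemma pyGetD_resolve (v : List Int) (y : Int) :
    (∃ (k : Nat) (hk : k < v.length),
        PySem.List.pyIdx? v.length y = some k ∧ PySem.List.pyGetD v y 0 = v[k]) ∨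
    (PySem.List.pyIdx? v.length y = none ∧ PySem.List.pyGetD v y 0 = 0) := by
  cases hk : PySem.List.pyIdx? v.length y with
  | none => right; exact ⟨rfl, by simp [PySem.List.pyGetD, PySem.List.pyGet?, hk]⟩
  | some k =>
      left
      have hlt := pyIdx?_some_lt hk
      exact ⟨k, hlt, rfl, by simp [PySem.List.pyGetD, PySem.List.pyGet?, hk, List.getElem?_eq_getElem hlt]⟩

-- a mark that does not change unvisA preserves every 0-entry
lemma mark_preserve0 {v v2 : List Int} {z : Int}
    (h : PySem.List.pySet? v z 1 = some v2) (heq : unvisA v2 = unvisA v)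
    (y : Int) (hy : PySem.List.pyGetD v y 0 = 0) : PySem.List.pyGetD v2 y 0 = 0 := by
  obtain ⟨m, hm, hv2, hgd⟩ := pySet?_resolve h
  subst hv2
  have hm0 : v[m] ≠ 0 := by
    intro h0
    have := unvisA_set_lt v m hm h0
    omega
  rcases pyGetD_resolve v y with ⟨k, hk, hik, hgk⟩ | ⟨hik, _⟩
  · have hkm : k ≠ m := by
      intro hkm
      subst hkm
      rw [hgk] at hy
      exact hm0 hy
    rcases pyGetD_resolve (v.set m 1) y with ⟨k', hk', hik', hgk'⟩ | ⟨hik', hg'⟩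
    · simp only [List.length_set] at hik'
      rw [hik] at hik'
      injection hik' with hkk
      subst hkk
      rw [hgk', List.getElem_set_ne (by omega)]
      rw [hgk] at hy; exact hy
    · exact hg'
  · rcases pyGetD_resolve (v.set m 1) y with ⟨k', hk', hik', _⟩ | ⟨_, hg'⟩
    · simp only [List.length_set] at hik'
      rw [hik] at hik'
      cases hik'
    · exact hg'

lemma innerA_mono (arr : List Int) : ∀ (visited pos nextPos v' np' : List Int),
    innerA arr visited pos nextPos = .cont v' np' → unvisA v' ≤ unvisA visited := by
  intro visited pos nextPos v' np' h
  fun_induction innerA arr visited pos nextPos with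
  | case1 v np hp => cases h; exact le_rfl
  | case2 => cases h
  | case3 => cases h
  | case4 => cases h
  | case5 v pos np x rest hp a hga hane v2 hset np1 np2 ih =>
      obtain ⟨m, hm, hv2, _⟩ := pySet?_resolve hset
      have h1 := ih h
      have h2 := unvisA_set_le v m
      rw [← hv2] at h2; omega

lemma innerA_preserve0 (arr : List Int) : ∀ (visited pos nextPos v' np' : List Int),
    innerA arr visited pos nextPos = .cont v' np' → unvisA v' = unvisA visited →
    ∀ y, PySem.List.pyGetD visited y 0 = 0 → PySem.List.pyGetD v' y 0 = 0 := by
  intro visited pos nextPos v' np' h heq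
  fun_induction innerA arr visited pos nextPos with
  | case1 v np hp => cases h; intro y hy; exact hy
  | case2 => cases h
  | case3 => cases h
  | case4 => cases h
  | case5 v pos np x rest hp a hga hane v2 hset np1 np2 ih =>
      have hle1 := innerA_mono arr v2 rest np2 v' np' h
      obtain ⟨m, hm, hv2, _⟩ := pySet?_resolve hset
      have hle2 := unvisA_set_le v m
      rw [← hv2] at hle2
      have heq2 : unvisA v2 = unvisA v := by omega
      have heq1 : unvisA v' = unvisA v2 := by omega
      intro y hy
      exact ih h heq1 y (mark_preserve0 hset heq2 y hy)

lemma innerA_measure (arr : List Int) : ∀ (visited pos nextPos v' np' : List Int),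
    innerA arr visited pos nextPos = .cont v' np' →
    unvisA v' < unvisA visited ∨
    (unvisA v' = unvisA visited ∧
      (∀ x ∈ pos, PySem.List.pyGetD visited x 0 ≠ 0) ∧
      (∀ y ∈ np', y ∈ nextPos ∨ PySem.List.pyGetD v' y 0 = 0)) := by
  intro visited pos nextPos v' np' h
  fun_induction innerA arr visited pos nextPos with
  | case1 v pos np hp =>
      cases h
      right
      refine ⟨rfl, ?_, fun y hy => Or.inl hy⟩
      rw [pop?_none_eq pos hp]; simp
  | case2 => cases h
  | case3 => cases h
  | case4 => cases h
  | case5 v pos np x rest hp a hga hane v2 hset np1 np2 ih =>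
      obtain ⟨m, hm, hv2, hgd⟩ := pySet?_resolve hset
      by_cases hmz : v[m] = 0
      · left
        have h1 := unvisA_set_lt v m hm hmz
        rw [← hv2] at h1
        have h2 := innerA_mono arr v2 rest np2 v' np' h
        omega
      · have heq2 : unvisA v2 = unvisA v := by
          have := unvisA_set_eq v m hm hmz; rw [← hv2] at this; exact this
        rcases ih h with hlt | ⟨heq1, hrest, hnp⟩
        · left; omega
        · right
          refine ⟨by omega, ?_, ?_⟩
          · intro w hw
            rw [pop?_concat hp] at hw
            rcases List.mem_append.mp hw with hw | hw
            · intro h0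
              exact hrest w hw (mark_preserve0 hset heq2 w h0)
            · simp at hw; subst hw
              rw [hgd]; exact fun hc => hmz hc
          · -- every y ∈ np2 is either old (∈ np) or was pushed with a 0-entry in v2
            have hmem : ∀ y ∈ np2, y ∈ np ∨ PySem.List.pyGetD v2 y 0 = 0 := by
              intro y hy
              simp only [np2, np1] at hy
              split_ifs at hy with c1 c2 c2
              · rcases List.mem_append.mp hy with hy3 | hy3
                · rcases List.mem_append.mp hy3 with hy4 | hy4
                  · exact Or.inl hy4
                  · simp at hy4; subst hy4
                    first | exact Or.inr c1.2.2 | exact Or.inr c2.2.2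
                · simp at hy3; subst hy3
                  first | exact Or.inr c1.2.2 | exact Or.inr c2.2.2
              · rcases List.mem_append.mp hy with hy3 | hy3
                · exact Or.inl hy3
                · simp at hy3; subst hy3
                  first | exact Or.inr c1.2.2 | exact Or.inr c2.2.2
              · rcases List.mem_append.mp hy with hy3 | hy3
                · exact Or.inl hy3
                · simp at hy3; subst hy3
                  first | exact Or.inr c1.2.2 | exact Or.inr c2.2.2
              · exact Or.inl hy
            intro y hy
            rcases hnp y hy with hy2 | hy2
            · rcases hmem y hy2 with hy3 | hy3
              · exact Or.inl hy3
              · exact Or.inr (innerA_preserve0 arr v2 rest np2 v' np' h heq1 y hy3)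
            · exact Or.inr hy2


-- the reachability relation A computes: moves x → x ± arr[x] between in-range
-- indices, taken only from indices whose value is non-zero
inductive Reach (arr : List Int) (start : Int) : Int → Prop where
  | base : Reach arr start start
  | step (x y : Int) : Reach arr start x → 0 ≤ x → x < (arr.length : Int) →
      PySem.List.pyGetD arr x 0 ≠ 0 →
      (y = x - PySem.List.pyGetD arr x 0 ∨ y = x + PySem.List.pyGetD arr x 0) →
      0 ≤ y → y < (arr.length : Int) → Reach arr start y

-- "some in-range index with value 0 is reachable from start"
def ZeroReach (arr : List Int) (start : Int) : Prop :=
  ∃ i, Reach arr start i ∧ 0 ≤ i ∧ i < (arr.length : Int) ∧ PySem.List.pyGetD arr i 0 = 0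

-- the same relation seen from the zero side (what B's fixed point computes)
inductive CanZero (arr : List Int) : Int → Prop where
  | zero (i : Int) : 0 ≤ i → i < (arr.length : Int) → PySem.List.pyGetD arr i 0 = 0 →
      CanZero arr i
  | step (i j : Int) : 0 ≤ i → i < (arr.length : Int) → PySem.List.pyGetD arr i 0 ≠ 0 →
      (j = i - PySem.List.pyGetD arr i 0 ∨ j = i + PySem.List.pyGetD arr i 0) →
      0 ≤ j → j < (arr.length : Int) → CanZero arr j → CanZero arr i

lemma pyGet?_getD {arr : List Int} {x a : Int}
    (h : PySem.List.pyGet? arr x = some a) : PySem.List.pyGetD arr x 0 = a := by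
  simp [PySem.List.pyGetD, h]

lemma pyGet?_inR (v : List Int) (z : Int) (hz0 : 0 ≤ z) (hz1 : z < (v.length : Int)) :
    ∃ a, PySem.List.pyGet? v z = some a := by
  unfold PySem.List.pyGet? PySem.List.pyIdx?
  rw [if_pos hz0, if_pos hz1]
  exact ⟨v[z.toNat]'(by omega), by simp [List.getElem?_eq_getElem (by omega : z.toNat < v.length)]⟩

lemma pySet?_inR (v : List Int) (z : Int) (hz0 : 0 ≤ z) (hz1 : z < (v.length : Int)) :
    PySem.List.pySet? v z (1 : Int) = some (v.set z.toNat 1) := by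
  unfold PySem.List.pySet? PySem.List.pyIdx?
  rw [if_pos hz0, if_pos hz1]
  rfl

-- reading the visited list after visited[z] = 1, at in-range indices
lemma markedD_set (v : List Int) (z y : Int)
    (hz0 : 0 ≤ z) (hz1 : z < (v.length : Int)) (hy0 : 0 ≤ y) (hy1 : y < (v.length : Int)) :
    PySem.List.pyGetD (v.set z.toNat 1) y 0 =
      if y = z then 1 else PySem.List.pyGetD v y 0 := by
  have hylen : y < ((v.set z.toNat 1).length : Int) := by simp; omega
  rw [PySem.List.pyGetD_eq_getElem _ 0 hy0 hylen, PySem.List.pyGetD_eq_getElem v 0 hy0 hy1]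
  by_cases hyz : y = z
  · subst hyz
    rw [if_pos rfl, List.getElem_set_self (by omega)]
  · rw [if_neg hyz, List.getElem_set_ne (by omega)]

lemma pyGetD_replicate0 (n : Nat) (x : Int) :
    PySem.List.pyGetD (List.replicate n (0 : Int)) x 0 = 0 := by
  rcases pyGetD_resolve (List.replicate n (0 : Int)) x with ⟨k, hk, _, hg⟩ | ⟨_, hg⟩
  · rw [hg, List.getElem_replicate]
  · exact hg

-- ---------- ZeroReach ↔ CanZero ----------

lemma reach_trans (arr : List Int) (s x i : Int)
    (h1 : Reach arr s x) (h2 : Reach arr x i) : Reach arr s i := by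
  induction h2 with
  | base => exact h1
  | step a b ha ha0 ha1 hv he hb0 hb1 ih => exact Reach.step a b ih ha0 ha1 hv he hb0 hb1

lemma canZero_of_reach (arr : List Int) (s i : Int)
    (h : Reach arr s i) (hz : CanZero arr i) : CanZero arr s := by
  induction h with
  | base => exact hz
  | step x y hx hx0 hx1 hv he hy0 hy1 ih =>
      exact ih (CanZero.step x y hx0 hx1 hv he hy0 hy1 hz)

lemma zeroReach_iff_canZero (arr : List Int) (s : Int) :
    ZeroReach arr s ↔ CanZero arr s := by
  constructor
  · rintro ⟨i, hr, hi0, hi1, hiz⟩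
    exact canZero_of_reach arr s i hr (CanZero.zero i hi0 hi1 hiz)
  · intro h
    induction h with
    | zero i hi0 hi1 hiz => exact ⟨i, Reach.base, hi0, hi1, hiz⟩
    | step i j hi0 hi1 hv he hj0 hj1 hcz ih =>
        obtain ⟨k, hr, hk⟩ := ih
        exact ⟨k, reach_trans arr i j k (Reach.step i j Reach.base hi0 hi1 hv he hj0 hj1) hr, hk⟩

lemma outerA_dec' (arr visited pos v' np' : List Int)
    (hne : ¬ pos.isEmpty = true)
    (hin : innerA arr visited pos [] = InnerRes.cont v' np') :
    2 * unvisA v' + flagA v' np' < 2 * unvisA visited + flagA visited pos := by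
  rcases innerA_measure arr visited pos [] v' np' hin with hlt | ⟨heq, hmk, hnp⟩
  · have h1 : flagA v' np' ≤ 1 := by unfold flagA; split_ifs <;> omega
    omega
  · have h1 : flagA visited pos = 1 := by
      unfold flagA
      rw [if_pos]
      constructor
      · intro hc; rw [hc] at hne; simp at hne
      · rw [List.all_eq_true]; intro x hx; simpa using hmk x hx
    have h0 : flagA v' np' = 0 := by
      unfold flagA
      rcases np' with _ | ⟨y, t⟩
      · simp
      · rw [if_neg]
        rintro ⟨-, hall⟩
        rw [List.all_eq_true] at hall
        have h2 := hall y List.mem_cons_self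
        rcases hnp y List.mem_cons_self with hc | hc
        · simp at hc
        · simp [hc] at h2
    omega

lemma unvisA_replicate (n : Nat) : unvisA (List.replicate n (0 : Int)) = n := by
  induction n with
  | zero => rfl
  | succ n ih => simp [List.replicate_succ, unvisA, List.countP_cons] at ih ⊢; omega

-- ---------- B's fixed point vs CanZero ----------

lemma stepIdx_elim (arr : List Int) (g : List Bool) (i : Nat) :
    stepIdx arr g i = (g, false) ∨
    (g.getD i false = false ∧ stepIdx arr g i = (g.set i true, true)) := by
  unfold stepIdx
  split_ifs with h1 h2 h3
  · exact Or.inl rfl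
  · exact Or.inr ⟨by simpa using h1, rfl⟩
  · exact Or.inr ⟨by simpa using h1, rfl⟩
  · exact Or.inl rfl

lemma countFalse_set_lt (g : List Bool) (i : Nat) (hi : i < g.length) (h0 : g[i] = false) :
    countFalse (g.set i true) < countFalse g := by
  induction g generalizing i with
  | nil => simp at hi
  | cons b t ih =>
      cases i with
      | zero =>
          simp only [List.getElem_cons_zero] at h0
          subst h0
          simp [countFalse, List.countP_cons]
      | succ i =>
          simp only [List.length_cons, Nat.succ_lt_succ_iff] at hi
          simp only [List.getElem_cons_succ] at h0
          simp only [countFalse, List.set_cons_succ, List.countP_cons]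
          have := ih i hi h0
          simp only [countFalse] at this; omega

lemma stepIdx_len (arr : List Int) (g : List Bool) (i : Nat) :
    (stepIdx arr g i).1.length = g.length := by
  rcases stepIdx_elim arr g i with h | ⟨_, h⟩ <;> rw [h] <;> simp

lemma passB_len (arr : List Int) : ∀ (idxs : List Nat) (g : List Bool) (ch : Bool),
    (passB arr idxs g ch).1.length = g.length := by
  intro idxs
  induction idxs with
  | nil => intro g ch; rfl
  | cons i t ih =>
      intro g ch
      simp only [passB]
      rw [ih]
      exact stepIdx_len arr g i

lemma passB_aux (arr : List Int) : ∀ (idxs : List Nat) (g : List Bool) (ch : Bool),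
    (∀ i ∈ idxs, i < g.length) →
    countFalse (passB arr idxs g ch).1 ≤ countFalse g ∧
    ((passB arr idxs g ch).2 = true → ch = true ∨ countFalse (passB arr idxs g ch).1 < countFalse g) := by
  intro idxs
  induction idxs with
  | nil => intro g ch _; exact ⟨le_rfl, fun h => Or.inl h⟩
  | cons i t ih =>
      intro g ch hidx
      simp only [passB]
      rcases stepIdx_elim arr g i with h | ⟨h0, h⟩
      · rw [h]
        simp only [Bool.or_false]
        exact ih g ch (fun j hj => hidx j (List.mem_cons_of_mem i hj))
      · rw [h]
        simp only [Bool.or_true]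
        have hi : i < g.length := hidx i List.mem_cons_self
        have hgi : g[i] = false := by
          rw [List.getD_eq_getElem g false hi] at h0; exact h0
        have hlt := countFalse_set_lt g i hi hgi
        have hidx' : ∀ j ∈ t, j < (g.set i true).length := by
          intro j hj; rw [List.length_set]; exact hidx j (List.mem_cons_of_mem i hj)
        obtain ⟨hle, _⟩ := ih (g.set i true) true hidx'
        exact ⟨by omega, fun _ => Or.inr (by omega)⟩


-- invariants of B's good table
def SoundB (arr : List Int) (g : List Bool) : Prop :=
  ∀ k : Nat, k < g.length → g.getD k false = true → CanZero arr (k : Int)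

def ZerosB (arr : List Int) (g : List Bool) : Prop :=
  ∀ k : Nat, k < arr.length → PySem.List.pyGetD arr (k : Int) 0 = 0 → g.getD k false = true

-- arr.getD over Nat index agrees with Python's arr[i] at in-range casts
lemma pyGetD_cast (arr : List Int) (i : Nat) :
    PySem.List.pyGetD arr (i : Int) 0 = arr.getD i 0 := by
  simp [PySem.List.pyGetD_natCast]

lemma getD_set_true (g : List Bool) (i k : Nat) :
    (g.set i true).getD k false = if k = i ∧ i < g.length then true else g.getD k false := by
  by_cases hik : k = i
  · subst hik
    by_cases hi : k < g.length
    · have h2 : k < (g.set k true).length := by simp only [List.length_set]; exact hi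
      rw [if_pos ⟨rfl, hi⟩, List.getD_eq_getElem _ false h2, List.getElem_set_self h2]
    · rw [if_neg (fun h => hi h.2), List.set_eq_of_length_le (by omega)]
  · rw [if_neg (fun h => hik h.1)]
    by_cases hk : k < g.length
    · have h2 : k < (g.set i true).length := by simp only [List.length_set]; exact hk
      rw [List.getD_eq_getElem _ false h2, List.getD_eq_getElem _ false hk,
         List.getElem_set_ne (by omega)]
    · have hk' : g.length ≤ k := by omega
      rw [List.getD_eq_default (g.set i true) false (by simp only [List.length_set]; exact hk'),
         List.getD_eq_default g false hk']

lemma stepIdx_closed (arr : List Int) (g : List Bool) (i : Nat)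
    (h : stepIdx arr g i = (g, false)) (hgi : g.getD i false = false) :
    ∀ j : Int, (j = (i : Int) - arr.getD i 0 ∨ j = (i : Int) + arr.getD i 0) →
      0 ≤ j → j < (arr.length : Int) → g.getD j.toNat false = false := by
  unfold stepIdx at h
  split_ifs at h with h1 h2 h3
  · rw [h1] at hgi; cases hgi
  · simp at h
  · simp at h
  · intro j hj hj0 hj1
    rcases hj with rfl | rfl
    · by_contra hc
      rw [Bool.not_eq_false] at hc
      exact h2 ⟨hj0, hj1, hc⟩
    · by_contra hc
      rw [Bool.not_eq_false] at hc
      exact h3 ⟨hj0, hj1, hc⟩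

-- the neighbour that fired when stepIdx flips good[i]
lemma stepIdx_fired (arr : List Int) (g : List Bool) (i : Nat)
    (h : stepIdx arr g i = (g.set i true, true)) :
    ∃ j : Int, (j = (i : Int) - arr.getD i 0 ∨ j = (i : Int) + arr.getD i 0) ∧
      0 ≤ j ∧ j < (arr.length : Int) ∧ g.getD j.toNat false = true := by
  unfold stepIdx at h
  split_ifs at h with h1 h2 h3
  · exact absurd (congrArg Prod.snd h) (by simp)
  · exact ⟨_, Or.inl rfl, h2.1, h2.2.1, h2.2.2⟩
  · exact ⟨_, Or.inr rfl, h3.1, h3.2.1, h3.2.2⟩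
  · exact absurd (congrArg Prod.snd h) (by simp)

lemma stepIdx_inv (arr : List Int) (g : List Bool) (i : Nat)
    (hlen : g.length = arr.length) (hi : i < arr.length)
    (hs : SoundB arr g) (hz : ZerosB arr g) :
    SoundB arr (stepIdx arr g i).1 ∧ ZerosB arr (stepIdx arr g i).1 := by
  rcases stepIdx_elim arr g i with he | ⟨hgi, he⟩
  · rw [he]; exact ⟨hs, hz⟩
  · obtain ⟨j, hedge, hj0, hj1, hjg⟩ := stepIdx_fired arr g i he
    rw [he]
    have hczj : CanZero arr j := by
      have := hs j.toNat (by omega) hjg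
      rwa [Int.toNat_of_nonneg hj0] at this
    have hne : PySem.List.pyGetD arr (i : Int) 0 ≠ 0 := by
      intro h0
      rw [hz i hi h0] at hgi
      cases hgi
    have hedge' : j = (i : Int) - PySem.List.pyGetD arr (i : Int) 0 ∨
        j = (i : Int) + PySem.List.pyGetD arr (i : Int) 0 := by
      rw [pyGetD_cast]; exact hedge
    have hczi : CanZero arr (i : Int) :=
      CanZero.step (i : Int) j (Int.natCast_nonneg i) (by exact_mod_cast hi) hne hedge' hj0 hj1 hczj
    constructor
    · intro k hk hkt
      rw [List.length_set] at hk
      rw [getD_set_true] at hkt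
      split_ifs at hkt with hcond
      · obtain ⟨rfl, -⟩ := hcond
        exact hczi
      · exact hs k hk hkt
    · intro k hk hk0
      rw [getD_set_true]
      split_ifs with hcond
      · rfl
      · exact hz k hk hk0

lemma passB_inv (arr : List Int) : ∀ (idxs : List Nat) (g : List Bool) (ch : Bool),
    (∀ i ∈ idxs, i < arr.length) → g.length = arr.length →
    SoundB arr g → ZerosB arr g →
    SoundB arr (passB arr idxs g ch).1 ∧ ZerosB arr (passB arr idxs g ch).1 := by
  intro idxs
  induction idxs with
  | nil => intro g ch _ _ hs hz; exact ⟨hs, hz⟩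
  | cons i t ih =>
      intro g ch hidx hlen hs hz
      simp only [passB]
      have hi : i < arr.length := hidx i List.mem_cons_self
      obtain ⟨hs', hz'⟩ := stepIdx_inv arr g i hlen hi hs hz
      exact ih _ _ (fun j hj => hidx j (List.mem_cons_of_mem i hj))
        (by rw [stepIdx_len]; exact hlen) hs' hz'

lemma passB_snd_true (arr : List Int) : ∀ (idxs : List Nat) (g : List Bool),
    (passB arr idxs g true).2 = true := by
  intro idxs
  induction idxs with
  | nil => intro g; rfl
  | cons i t ih => intro g; simp only [passB, Bool.true_or]; exact ih _

lemma stepIdx_snd_false (arr : List Int) (g : List Bool) (i : Nat)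
    (h : (stepIdx arr g i).2 = false) : stepIdx arr g i = (g, false) := by
  rcases stepIdx_elim arr g i with he | ⟨_, he⟩
  · exact he
  · rw [he] at h; cases h

lemma passB_false (arr : List Int) : ∀ (idxs : List Nat) (g g' : List Bool),
    passB arr idxs g false = (g', false) →
    g' = g ∧ ∀ i ∈ idxs, stepIdx arr g i = (g, false) := by
  intro idxs
  induction idxs with
  | nil =>
      intro g g' h
      injection h with h1 _
      exact ⟨h1.symm, fun i hi => absurd hi (List.not_mem_nil)⟩
  | cons i t ih =>
      intro g g' h
      simp only [passB, Bool.false_or] at h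
      by_cases hc : (stepIdx arr g i).2 = true
      · exfalso
        rw [hc] at h
        have := congrArg Prod.snd h
        rw [passB_snd_true] at this
        exact Bool.true_eq_false ▸ this
      · rw [Bool.not_eq_true] at hc
        have hstep := stepIdx_snd_false arr g i hc
        rw [hc, hstep] at h
        obtain ⟨hg, hrest⟩ := ih g g' h
        refine ⟨hg, fun j hj => ?_⟩
        rcases List.mem_cons.mp hj with rfl | hj
        · exact hstep
        · exact hrest j hj

-- the complete characterisation of B's loop result (fuel large enough)
lemma loopFixB_spec (arr : List Int) : ∀ (fuel : Nat) (good : List Bool) (forward : Bool),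
    countFalse good < fuel → good.length = arr.length →
    SoundB arr good → ZerosB arr good →
    (loopFixB arr good forward fuel).length = arr.length ∧
    SoundB arr (loopFixB arr good forward fuel) ∧
    ZerosB arr (loopFixB arr good forward fuel) ∧
    ∀ i : Nat, i < arr.length →
      stepIdx arr (loopFixB arr good forward fuel) i = (loopFixB arr good forward fuel, false) := by
  intro fuel
  induction fuel with
  | zero => intro good forward hfuel; omega
  | succ fuel ih =>
      intro good forward hfuel hlen hs hz
      simp only [loopFixB]
      have hidx : ∀ i ∈ (if forward then List.range arr.length else (List.range arr.length).reverse),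
          i < arr.length := by
        intro i hi
        split at hi
        · simpa using hi
        · rw [List.mem_reverse, List.mem_range] at hi; exact hi
      have hidx' : ∀ i ∈ (if forward then List.range arr.length else (List.range arr.length).reverse),
          i < good.length := by
        intro i hi; rw [hlen]; exact hidx i hi
      by_cases h : (passB arr (if forward = true then List.range arr.length else (List.range arr.length).reverse) good false).2 = true
      · rw [if_pos h]
        obtain ⟨hs', hz'⟩ := passB_inv arr _ good false hidx hlen hs hz
        have hlt := ((passB_aux arr _ good false hidx').2 h).resolve_left (by simp)
        exact ih _ (!forward) (by omega) (by rw [passB_len]; exact hlen) hs' hz'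
      · rw [if_neg h]
        rw [Bool.not_eq_true] at h
        have hpass := (Prod.mk.eta (p := passB arr (if forward = true then List.range arr.length else (List.range arr.length).reverse) good false)).symm
        rw [h] at hpass
        obtain ⟨hg, hfix⟩ := passB_false arr _ good _ hpass
        rw [hg]
        refine ⟨hlen, hs, hz, ?_⟩
        intro i hi
        apply hfix
        split
        · rw [List.mem_range]; exact hi
        · rw [List.mem_reverse, List.mem_range]; exact hi

-- at the fixed point, everything that can reach a zero is marked
lemma fixpoint_complete (arr : List Int) (g : List Bool)
    (hlen : g.length = arr.length) (hz : ZerosB arr g)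
    (hfix : ∀ i : Nat, i < arr.length → stepIdx arr g i = (g, false)) :
    ∀ x : Int, CanZero arr x → g.getD x.toNat false = true := by
  intro x hx
  induction hx with
  | zero i hi0 hi1 hiz =>
      exact hz i.toNat (by omega) (by rw [Int.toNat_of_nonneg hi0]; exact hiz)
  | step i j hi0 hi1 hne hedge hj0 hj1 hcz ih =>
      by_contra hc
      rw [Bool.not_eq_true] at hc
      have hfx := hfix i.toNat (by omega)
      have hclosed := stepIdx_closed arr g i.toNat hfx hc j
        (by rw [Int.toNat_of_nonneg hi0, ← pyGetD_cast, Int.toNat_of_nonneg hi0]; exact hedge)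
        hj0 hj1
      rw [ih] at hclosed
      cases hclosed

lemma alt_iff (arr : List Int) (start : Int)
    (hs0 : 0 ≤ start) (hs1 : start < (arr.length : Int)) :
    canReach3_alt arr start = true ↔ ZeroReach arr start := by
  unfold canReach3_alt
  have hs : SoundB arr (arr.map fun a => a == 0) := by
    intro k hk hkt
    rw [List.length_map] at hk
    rw [List.getD_eq_getElem _ false (by simpa using hk)] at hkt
    simp only [List.getElem_map, beq_iff_eq] at hkt
    refine CanZero.zero (k : Int) (Int.natCast_nonneg k) (by exact_mod_cast hk) ?_
    rw [pyGetD_cast, List.getD_eq_getElem _ 0 hk]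
    exact hkt
  have hzz : ZerosB arr (arr.map fun a => a == 0) := by
    intro k hk hk0
    rw [pyGetD_cast, List.getD_eq_getElem _ 0 hk] at hk0
    rw [List.getD_eq_getElem _ false (by simpa using hk)]
    simp [hk0]
  obtain ⟨hlenF, hsF, hzF, hfixF⟩ :=
    loopFixB_spec arr (countFalse (arr.map fun a => a == 0) + 1) (arr.map fun a => a == 0) true
      (by omega) (by simp) hs hzz
  have hlt : start.toNat < (loopFixB arr (arr.map fun a => a == 0) true (countFalse (arr.map fun a => a == 0) + 1)).length := by
    rw [hlenF]; omega
  have hread : PySem.List.pyGetD (loopFixB arr (arr.map fun a => a == 0) true (countFalse (arr.map fun a => a == 0) + 1)) start false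
      = (loopFixB arr (arr.map fun a => a == 0) true (countFalse (arr.map fun a => a == 0) + 1)).getD start.toNat false := by
    rw [PySem.List.pyGetD_eq_getElem _ false hs0 (by rw [hlenF]; exact hs1),
       List.getD_eq_getElem _ false hlt]
  rw [hread, zeroReach_iff_canZero]
  constructor
  · intro h
    have := hsF start.toNat hlt h
    rwa [Int.toNat_of_nonneg hs0] at this
  · intro h
    exact fixpoint_complete arr _ hlenF hzF hfixF start h

-- ---------- A (level search) vs ZeroReach ----------

lemma innerA_found_sound (arr : List Int) (start : Int) :
    ∀ (visited pos nextPos : List Int), innerA arr visited pos nextPos = .found →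
      (∀ x ∈ pos, (0 ≤ x ∧ x < (arr.length : Int)) ∧ Reach arr start x) →
      ZeroReach arr start := by
  intro visited pos nextPos h
  fun_induction innerA arr visited pos nextPos with
  | case1 v pos np hp => cases h
  | case2 v pos np x rest hp hga => cases h
  | case3 v pos np x rest hp hga =>
      intro hinv
      obtain ⟨⟨hx0, hx1⟩, hrx⟩ := hinv x (by rw [pop?_concat hp]; exact List.mem_append_right _ (by simp))
      exact ⟨x, hrx, hx0, hx1, pyGet?_getD hga⟩
  | case4 v pos np x rest hp a hga hane hset => cases h
  | case5 v pos np x rest hp a hga hane v2 hset np1 np2 ih =>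
      intro hinv
      exact ih h (fun w hw => hinv w (by rw [pop?_concat hp]; exact List.mem_append_left _ hw))

lemma innerA_err_not (arr : List Int) :
    ∀ (visited pos nextPos : List Int),
      (∀ x ∈ pos, 0 ≤ x ∧ x < (arr.length : Int)) → visited.length = arr.length →
      innerA arr visited pos nextPos ≠ .err := by
  intro visited pos nextPos
  fun_induction innerA arr visited pos nextPos with
  | case1 v pos np hp => intro _ _ h; cases h
  | case2 v pos np x rest hp hga =>
      intro hinv _ _
      obtain ⟨hx0, hx1⟩ := hinv x (by rw [pop?_concat hp]; exact List.mem_append_right _ (by simp))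
      obtain ⟨a, ha⟩ := pyGet?_inR arr x hx0 hx1
      rw [ha] at hga; cases hga
  | case3 v pos np x rest hp hga => intro _ _ h; cases h
  | case4 v pos np x rest hp a hga hane hset =>
      intro hinv hlen _
      obtain ⟨hx0, hx1⟩ := hinv x (by rw [pop?_concat hp]; exact List.mem_append_right _ (by simp))
      rw [pySet?_inR v x hx0 (by omega)] at hset
      cases hset
  | case5 v pos np x rest hp a hga hane v2 hset np1 np2 ih =>
      intro hinv hlen
      apply ih
      · intro w hw; exact hinv w (by rw [pop?_concat hp]; exact List.mem_append_left _ hw)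
      · obtain ⟨hx0, hx1⟩ := hinv x (by rw [pop?_concat hp]; exact List.mem_append_right _ (by simp))
        rw [pySet?_inR v x hx0 (by omega)] at hset
        injection hset with hset
        rw [← hset]; simp [hlen]

lemma innerA_cont_inv (arr : List Int) (start : Int)
    (hs0 : 0 ≤ start) (hs1 : start < (arr.length : Int)) :
    ∀ (visited pos nextPos v' np' : List Int),
      innerA arr visited pos nextPos = .cont v' np' →
      visited.length = arr.length →
      (∀ x ∈ pos, (0 ≤ x ∧ x < (arr.length : Int)) ∧ Reach arr start x) →
      (∀ x ∈ nextPos, (0 ≤ x ∧ x < (arr.length : Int)) ∧ Reach arr start x) →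
      (∀ x, 0 ≤ x → x < (arr.length : Int) → PySem.List.pyGetD visited x 0 ≠ 0 →
        PySem.List.pyGetD arr x 0 ≠ 0 ∧
        ∀ y, (y = x - PySem.List.pyGetD arr x 0 ∨ y = x + PySem.List.pyGetD arr x 0) →
          0 ≤ y → y < (arr.length : Int) →
          (PySem.List.pyGetD visited y 0 ≠ 0 ∨ y ∈ pos ∨ y ∈ nextPos)) →
      (PySem.List.pyGetD visited start 0 ≠ 0 ∨ start ∈ pos ∨ start ∈ nextPos) →
      v'.length = arr.length ∧
      (∀ x ∈ np', (0 ≤ x ∧ x < (arr.length : Int)) ∧ Reach arr start x) ∧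
      (∀ x, 0 ≤ x → x < (arr.length : Int) → PySem.List.pyGetD v' x 0 ≠ 0 →
        PySem.List.pyGetD arr x 0 ≠ 0 ∧
        ∀ y, (y = x - PySem.List.pyGetD arr x 0 ∨ y = x + PySem.List.pyGetD arr x 0) →
          0 ≤ y → y < (arr.length : Int) →
          (PySem.List.pyGetD v' y 0 ≠ 0 ∨ y ∈ np')) ∧
      (PySem.List.pyGetD v' start 0 ≠ 0 ∨ start ∈ np') := by
  intro visited pos nextPos v' np' h
  fun_induction innerA arr visited pos nextPos with
  | case1 v pos np hp =>
      cases h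
      intro hlen hpos hnp hm hstart
      have hpe : pos = [] := pop?_none_eq _ hp
      subst hpe
      refine ⟨hlen, hnp, ?_, ?_⟩
      · intro w hw0 hw1 hMw
        obtain ⟨hv, hy⟩ := hm w hw0 hw1 hMw
        refine ⟨hv, ?_⟩
        intro y hedge hy0 hy1
        rcases hy y hedge hy0 hy1 with h1 | h1 | h1
        · exact Or.inl h1
        · cases h1
        · exact Or.inr h1
      · rcases hstart with h1 | h1 | h1
        · exact Or.inl h1
        · cases h1
        · exact Or.inr h1
  | case2 v pos np x rest hp hga => cases h
  | case3 v pos np x rest hp hga => cases h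
  | case4 v pos np x rest hp a hga hane hset => cases h
  | case5 v pos np x rest hp a hga hane v2 hset np1 np2 ih =>
      intro hlen hpos hnp hm hstart
      obtain ⟨⟨hx0, hx1⟩, hrx⟩ := hpos x (by rw [pop?_concat hp]; exact List.mem_append_right _ (by simp))
      have hgd : PySem.List.pyGetD arr x 0 = a := pyGet?_getD hga
      have hv2 : v2 = v.set x.toNat 1 := by
        rw [pySet?_inR v x hx0 (by omega)] at hset
        injection hset with hset
        exact hset.symm
      have hlen2 : v2.length = arr.length := by rw [hv2]; simp [hlen]
      have hmk : ∀ y : Int, 0 ≤ y → y < (arr.length : Int) →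
          PySem.List.pyGetD v2 y 0 = if y = x then 1 else PySem.List.pyGetD v y 0 := by
        intro y hy0 hy1
        rw [hv2]
        exact markedD_set v x y hx0 (by omega) hy0 (by omega)
      have hrest : ∀ w ∈ rest, (0 ≤ w ∧ w < (arr.length : Int)) ∧ Reach arr start w :=
        fun w hw => hpos w (by rw [pop?_concat hp]; exact List.mem_append_left _ hw)
      have hnp1sub : ∀ y, y ∈ np → y ∈ np1 := by
        intro y hy
        simp only [np1]
        split_ifs
        · exact List.mem_append_left _ hy
        · exact hy
      have hnp2sub : ∀ y, y ∈ np1 → y ∈ np2 := by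
        intro y hy
        simp only [np2]
        split_ifs
        · exact List.mem_append_left _ hy
        · exact hy
      have hnp2inv : ∀ w ∈ np2, (0 ≤ w ∧ w < (arr.length : Int)) ∧ Reach arr start w := by
        intro w hw
        simp only [np2, np1] at hw
        have hstep : ∀ y : Int,
            (y = x - PySem.List.pyGetD arr x 0 ∨ y = x + PySem.List.pyGetD arr x 0) →
            0 ≤ y → y < (arr.length : Int) →
            (0 ≤ y ∧ y < (arr.length : Int)) ∧ Reach arr start y := by
          intro y hedge hy0 hy1
          exact ⟨⟨hy0, hy1⟩, Reach.step x y hrx hx0 hx1 (by rw [hgd]; exact hane) hedge hy0 hy1⟩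
        split_ifs at hw with c1 c2 c2
        · rcases List.mem_append.mp hw with hw3 | hw3
          · rcases List.mem_append.mp hw3 with hw4 | hw4
            · exact hnp w hw4
            · simp at hw4; subst hw4
              exact hstep _ (by rw [hgd]; first | exact Or.inl rfl | exact Or.inr rfl) (by first | exact c1.1 | exact c2.1) (by first | exact c1.2.1 | exact c2.2.1)
          · simp at hw3; subst hw3
            exact hstep _ (by rw [hgd]; first | exact Or.inl rfl | exact Or.inr rfl) (by first | exact c1.1 | exact c2.1) (by first | exact c1.2.1 | exact c2.2.1)
        · rcases List.mem_append.mp hw with hw3 | hw3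
          · exact hnp w hw3
          · simp at hw3; subst hw3
            exact hstep _ (by rw [hgd]; first | exact Or.inl rfl | exact Or.inr rfl) (by first | exact c1.1 | exact c2.1) (by first | exact c1.2.1 | exact c2.2.1)
        · rcases List.mem_append.mp hw with hw3 | hw3
          · exact hnp w hw3
          · simp at hw3; subst hw3
            exact hstep _ (by rw [hgd]; first | exact Or.inl rfl | exact Or.inr rfl) (by first | exact c1.1 | exact c2.1) (by first | exact c1.2.1 | exact c2.2.1)
        · exact hnp w hw
      -- the pushed-or-marked property of the two filtered pushes
      have hpush : ∀ y : Int,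
          (y = x - a ∨ y = x + a) → 0 ≤ y → y < (arr.length : Int) →
          (PySem.List.pyGetD v2 y 0 ≠ 0 ∨ y ∈ np2) := by
        intro y hedge hy0 hy1
        by_cases hm2 : PySem.List.pyGetD v2 y 0 = 0
        · apply Or.inr
          rcases hedge with h1 | h1
          · subst h1
            apply hnp2sub
            simp only [np1]
            rw [dif_pos ⟨hy0, hy1, hm2⟩]
            exact List.mem_append_right _ (by simp)
          · subst h1
            simp only [np2]
            rw [dif_pos ⟨hy0, hy1, hm2⟩]
            exact List.mem_append_right _ (by simp)
        · exact Or.inl hm2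
      apply ih h hlen2 hrest hnp2inv
      · intro w hw0 hw1 hMw
        rw [hmk w hw0 hw1] at hMw
        by_cases hwx : w = x
        · subst hwx
          refine ⟨by rw [hgd]; exact hane, ?_⟩
          intro y hedge hy0 hy1
          rcases hpush y (by rw [← hgd]; exact hedge) hy0 hy1 with h1 | h1
          · exact Or.inl h1
          · exact Or.inr (Or.inr h1)
        · rw [if_neg hwx] at hMw
          obtain ⟨hv, hy⟩ := hm w hw0 hw1 hMw
          refine ⟨hv, ?_⟩
          intro y hedge hy0 hy1
          rcases hy y hedge hy0 hy1 with h1 | h1 | h1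
          · apply Or.inl
            rw [hmk y hy0 hy1]
            by_cases hyx : y = x
            · rw [if_pos hyx]; norm_num
            · rw [if_neg hyx]; exact h1
          · rw [pop?_concat hp] at h1
            rcases List.mem_append.mp h1 with h1 | h1
            · exact Or.inr (Or.inl h1)
            · simp at h1
              apply Or.inl
              rw [h1, hmk x hx0 hx1, if_pos rfl]; norm_num
          · exact Or.inr (Or.inr (hnp2sub _ (hnp1sub _ h1)))
      · rcases hstart with h1 | h1 | h1
        · apply Or.inl
          rw [hmk start hs0 hs1]
          by_cases hsx : start = x
          · rw [if_pos hsx]; norm_num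
          · rw [if_neg hsx]; exact h1
        · rw [pop?_concat hp] at h1
          rcases List.mem_append.mp h1 with h1 | h1
          · exact Or.inr (Or.inl h1)
          · simp at h1
            apply Or.inl
            rw [h1, hmk x hx0 hx1, if_pos rfl]; norm_num
        · exact Or.inr (Or.inr (hnp2sub _ (hnp1sub _ h1)))

lemma outerA_iff (arr : List Int) (start : Int)
    (hs0 : 0 ≤ start) (hs1 : start < (arr.length : Int)) :
    ∀ (fuel : Nat) (visited pos : List Int),
      2 * unvisA visited + flagA visited pos < fuel →
      visited.length = arr.length →
      (∀ x ∈ pos, (0 ≤ x ∧ x < (arr.length : Int)) ∧ Reach arr start x) →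
      (∀ x, 0 ≤ x → x < (arr.length : Int) → PySem.List.pyGetD visited x 0 ≠ 0 →
        PySem.List.pyGetD arr x 0 ≠ 0 ∧
        ∀ y, (y = x - PySem.List.pyGetD arr x 0 ∨ y = x + PySem.List.pyGetD arr x 0) →
          0 ≤ y → y < (arr.length : Int) →
          (PySem.List.pyGetD visited y 0 ≠ 0 ∨ y ∈ pos)) →
      (PySem.List.pyGetD visited start 0 ≠ 0 ∨ start ∈ pos) →
      (outerA arr visited pos fuel = true ↔ ZeroReach arr start) := by
  intro fuel
  induction fuel with
  | zero => intro visited pos hf; omega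
  | succ fuel ih =>
      intro visited pos hf hlen hpos hm hstart
      simp only [outerA]
      by_cases hne : pos.isEmpty
      · rw [if_pos hne]
        have hpe : pos = [] := by rwa [List.isEmpty_iff] at hne
        subst hpe
        constructor
        · intro h; cases h
        · intro hZ
          exfalso
          have hsm : PySem.List.pyGetD visited start 0 ≠ 0 := by
            rcases hstart with h1 | h1
            · exact h1
            · cases h1
          have hall : ∀ j, Reach arr start j → 0 ≤ j → j < (arr.length : Int) →
              PySem.List.pyGetD visited j 0 ≠ 0 := by
            intro j hj
            induction hj with
            | base => intro _ _; exact hsm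
            | step x y hx hx0 hx1 hval hedge hy0 hy1 ihx =>
                intro _ _
                rcases (hm x hx0 hx1 (ihx hx0 hx1)).2 y hedge hy0 hy1 with h1 | h1
                · exact h1
                · cases h1
          obtain ⟨i, hi, hi0, hi1, hiz⟩ := hZ
          exact (hm i hi0 hi1 (hall i hi hi0 hi1)).1 hiz
      · rw [if_neg hne]
        split
        · rename_i hin
          constructor
          · intro _
            exact innerA_found_sound arr start visited pos [] hin hpos
          · intro _; rfl
        · rename_i hin
          exfalso
          exact innerA_err_not arr visited pos [] (fun x hx => (hpos x hx).1) hlen hin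
        · rename_i v' np' hin
          obtain ⟨hlen', hnp', hm', hstart'⟩ :=
            innerA_cont_inv arr start hs0 hs1 visited pos [] v' np' hin hlen hpos
              (fun x hx => absurd hx (List.not_mem_nil))
              (by
                intro x hx0 hx1 hMx
                obtain ⟨hv, hy⟩ := hm x hx0 hx1 hMx
                refine ⟨hv, ?_⟩
                intro y hedge hy0 hy1
                rcases hy y hedge hy0 hy1 with h1 | h1
                · exact Or.inl h1
                · exact Or.inr (Or.inl h1))
              (by
                rcases hstart with h1 | h1
                · exact Or.inl h1
                · exact Or.inr (Or.inl h1))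
          have hdec := outerA_dec' arr visited pos v' np' hne hin
          apply ih v' np' (by omega) hlen' hnp'
          · intro x hx0 hx1 hMx
            obtain ⟨hv, hy⟩ := hm' x hx0 hx1 hMx
            exact ⟨hv, fun y hedge hy0 hy1 => hy y hedge hy0 hy1⟩
          · exact hstart'

lemma a_iff (arr : List Int) (start : Int)
    (hs0 : 0 ≤ start) (hs1 : start < (arr.length : Int)) :
    canReach3 arr start = true ↔ ZeroReach arr start := by
  unfold canReach3
  apply outerA_iff arr start hs0 hs1
  · have hflag : flagA (List.replicate arr.length 0) [start] = 0 := by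
      unfold flagA
      rw [if_neg]
      rintro ⟨-, hall⟩
      rw [List.all_eq_true] at hall
      have := hall start (by simp)
      simp [pyGetD_replicate0] at this
    rw [unvisA_replicate, hflag]
    omega
  · simp
  · intro x hx
    simp at hx; subst hx
    exact ⟨⟨hs0, hs1⟩, Reach.base⟩
  · intro x _ _ hMx
    exact absurd (pyGetD_replicate0 arr.length x) hMx
  · exact Or.inr (by simp)

-- ===== VERDICT =====
theorem canReach3_spec : Claim_equal_canReach3 := by
  intro arr start _ hpre
  obtain ⟨hs0, hs1⟩ := hpre
  unfold Spec_canReach3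
  have h1 := a_iff arr start hs0 hs1
  have h2 := alt_iff arr start hs0 hs1
  cases hA : canReach3 arr start <;> cases hB : canReach3_alt arr start <;> simp_all
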